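-- pv_equiv track=rewrite | github.com/kio-cs/MajorCert | code/utils_for_certify_cifar.py | the4_output
-- ===== SOURCE A (Python) =====
-- def the4_output(prediction_output, cert_output, single_result_record_dict):
--     if cert_output == True:
--         return prediction_output, cert_output
--     else:
--         if prediction_output == -1:
--             label_list = []
--             "output the smallest one"
--             for smoothing_method in single_result_record_dict:
--                 label_list.append(single_result_record_dict.get(smoothing_method))
--             previous_winner = the4_winner_judge(label_list)
--         else:
--             previous_winner = prediction_output
--
--         return previous_winner, cert_output
--
-- def the4_winner_judge(label_list):
--     label0 = label_list[0]
--     label1 = label_list[1]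
--     label2 = label_list[2]
--
--     if label0 == label1 or label0 == label2:
--         return label0
--     elif label1 == label2:
--         return label1
--     else:
--         if label0 < label2 < label1 or label0 < label1 < label2:
--             return label0
--         elif label1 < label0 < label2 or label1 < label2 < label0:
--             return label1
--         else:
--             return label2
-- ===== SOURCE B (Python) =====
-- def the4_output(prediction_output, cert_output, single_result_record_dict):
--     if cert_output:
--         return prediction_output, cert_output
--     if prediction_output != -1:
--         return prediction_output, cert_output
--     labels = list(single_result_record_dict.values())
--     trio = [labels[0], labels[1], labels[2]]
--     winner = min(trio, key=lambda x: (-trio.count(x), x))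
--     return winner, cert_output
-- ===== Notes on version B (the rewrite author's own statement) =====
-- stated objective: simpler
-- what changed: The unrolled pairwise-equality and ordering cascade of the4_winner_judge is replaced by a single count-then-min selection: the winner is min of the three labels keyed by (-occurrence count, value), i.e. majority first, ties toward the smallest value.
import Mathlib
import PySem

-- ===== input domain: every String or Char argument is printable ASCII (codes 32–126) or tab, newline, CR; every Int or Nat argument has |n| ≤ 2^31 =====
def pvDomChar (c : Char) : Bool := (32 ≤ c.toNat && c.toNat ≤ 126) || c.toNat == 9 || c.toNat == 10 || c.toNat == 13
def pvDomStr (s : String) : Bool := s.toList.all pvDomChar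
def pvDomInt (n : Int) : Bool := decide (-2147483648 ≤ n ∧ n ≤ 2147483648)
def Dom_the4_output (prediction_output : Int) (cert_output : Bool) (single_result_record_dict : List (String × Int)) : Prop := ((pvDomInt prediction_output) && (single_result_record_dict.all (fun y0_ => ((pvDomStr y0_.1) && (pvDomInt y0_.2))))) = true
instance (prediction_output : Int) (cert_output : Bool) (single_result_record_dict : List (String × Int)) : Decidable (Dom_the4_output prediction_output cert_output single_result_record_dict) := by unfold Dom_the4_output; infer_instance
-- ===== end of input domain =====

-- B replaces A's unrolled pairwise-equality and ordering cascade for the three labels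
-- by a count-then-min selection (majority label, ties broken toward the smallest value); objective: simpler.


-- ===== PORT A =====
-- label_list[0]/[1]/[2] raise IndexError on a short list: pyGet? = none there, excluded by Pre_.
def the4_winner_judge (label_list : List Int) : Option Int :=
  (PySem.List.pyGet? label_list 0).bind fun label0 =>
  (PySem.List.pyGet? label_list 1).bind fun label1 =>
  (PySem.List.pyGet? label_list 2).map fun label2 =>
    if label0 = label1 ∨ label0 = label2 then label0
    else if label1 = label2 then label1
    else if (label0 < label2 ∧ label2 < label1) ∨ (label0 < label1 ∧ label1 < label2) then label0
    else if (label1 < label0 ∧ label0 < label2) ∨ (label1 < label2 ∧ label2 < label0) then label1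
    else label2

def the4_output (prediction_output : Int) (cert_output : Bool) (single_result_record_dict : List (String × Int)) : Int × Bool :=
  if cert_output = true then (prediction_output, cert_output)
  else
    let previous_winner : Int :=
      if prediction_output = -1 then
        -- for smoothing_method in dict: label_list.append(dict.get(smoothing_method))
        let d := PySem.Dict.mk single_result_record_dict
        let label_list := d.keys.foldl (fun acc k => acc ++ [d.getD k 0]) []
        (the4_winner_judge label_list).getD 0   -- none = IndexError, excluded by Pre_
      else prediction_output
    (previous_winner, cert_output)

-- ===== PORT B =====
def the4_output_alt (prediction_output : Int) (cert_output : Bool) (single_result_record_dict : List (String × Int)) : Int × Bool :=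
  if cert_output then (prediction_output, cert_output)
  else if prediction_output ≠ -1 then (prediction_output, cert_output)
  else
    let labels := (PySem.Dict.mk single_result_record_dict).values
    match PySem.List.pyGet? labels 0, PySem.List.pyGet? labels 1, PySem.List.pyGet? labels 2 with
    | some l0, some l1, some l2 =>
        let trio := [l0, l1, l2]
        ((PySem.List.min2? trio (fun x => -((trio.count x : Int))) (fun x => x)).getD 0, cert_output)
    | _, _, _ => (0, cert_output)   -- labels[2] IndexError, excluded by Pre_

-- ===== PRECONDITION & SPEC =====
-- Pre_ excludes association lists with duplicate keys (not representable as a Python dict input),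
-- and, when the winner-judge branch runs (cert False, prediction -1), dicts with fewer than three
-- entries, on which A raises IndexError.
def Pre_the4_output (prediction_output : Int) (cert_output : Bool) (single_result_record_dict : List (String × Int)) : Prop :=
  (single_result_record_dict.map Prod.fst).Nodup ∧
  (cert_output = false → prediction_output = -1 → 3 ≤ single_result_record_dict.length)
instance (prediction_output : Int) (cert_output : Bool) (single_result_record_dict : List (String × Int)) : Decidable (Pre_the4_output prediction_output cert_output single_result_record_dict) := by unfold Pre_the4_output; infer_instance
def pvWitness_the4_output : Int × Bool × (List (String × Int)) := (-1, false, [("a", 2), ("b", 1), ("c", 1)])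

def Spec_the4_output (prediction_output : Int) (cert_output : Bool) (single_result_record_dict : List (String × Int)) (out : Int × Bool) : Prop := out = the4_output_alt prediction_output cert_output single_result_record_dict
instance (prediction_output : Int) (cert_output : Bool) (single_result_record_dict : List (String × Int)) (out : Int × Bool) : Decidable (Spec_the4_output prediction_output cert_output single_result_record_dict out) := by unfold Spec_the4_output; infer_instance

-- ===== CLAIM (what is proved, stated in full; the proofs are below) =====
def Claim_equal_the4_output : Prop := ∀ (prediction_output : Int) (cert_output : Bool) (single_result_record_dict : List (String × Int)), Dom_the4_output prediction_output cert_output single_result_record_dict → Pre_the4_output prediction_output cert_output single_result_record_dict → Spec_the4_output prediction_output cert_output single_result_record_dict (the4_output prediction_output cert_output single_result_record_dict)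

-- ===== LEMMAS AND PROOFS =====

-- A's cascade picks the majority label among three, ties toward the smallest value.
theorem winner_core (l0 l1 l2 : Int) :
    (PySem.List.min2? [l0,l1,l2] (fun x => -(([l0,l1,l2].count x : Int))) (fun x : Int => x)).getD 0
    = (if l0 = l1 ∨ l0 = l2 then l0
       else if l1 = l2 then l1
       else if (l0 < l2 ∧ l2 < l1) ∨ (l0 < l1 ∧ l1 < l2) then l0
       else if (l1 < l0 ∧ l0 < l2) ∨ (l1 < l2 ∧ l2 < l0) then l1
       else l2) := by
  simp only [PySem.List.min2?, List.foldl, List.count_cons, List.count_nil]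
  by_cases h01 : l0 = l1 <;> by_cases h02 : l0 = l2 <;> by_cases h12 : l1 = l2 <;>
    simp [h01, h02, h12] <;> split_ifs <;> simp_all <;> split_ifs <;> simp_all <;> omega

-- ===== VERDICT (by name: the statement is the Claim_ definition above) =====
theorem labels_eq_values (d : List (String × Int)) (hnd : (d.map Prod.fst).Nodup) :
    (PySem.Dict.mk d).keys.foldl (fun acc k => acc ++ [(PySem.Dict.mk d).getD k 0]) []
      = (PySem.Dict.mk d).values := by
  rw [PySem.List.foldl_append_singleton_eq_map]
  rw [PySem.Dict.values_eq_map_keys (PySem.Dict.mk d) (by simpa [PySem.Dict.keys] using hnd) 0]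
  simp

-- ===== VERDICT (by name: the statement is the Claim_ definition above) =====
theorem the4_output_spec : Claim_equal_the4_output := by
  intro p c d hDom hPre
  unfold Spec_the4_output the4_output the4_output_alt
  cases c with
  | true => simp
  | false =>
    by_cases hp : p = -1
    · subst hp
      simp only [if_neg (by decide : ¬ (false = true)), ne_eq, not_true_eq_false,
        if_false]
      rw [labels_eq_values d hPre.1]
      have hlen : 3 ≤ (PySem.Dict.mk d).values.length := by
        have := hPre.2 rfl rfl
        simpa [PySem.Dict.values, PySem.Dict.items] using this
      rcases hv : (PySem.Dict.mk d).values with _ | ⟨l0, _ | ⟨l1, _ | ⟨l2, rest⟩⟩⟩ <;>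
        simp [hv] at hlen ⊢
      · -- the generic three-or-more case
        unfold the4_winner_judge
        rw [show PySem.List.pyGet? (l0::l1::l2::rest) 0 = some l0 by simp [pysem],
            show PySem.List.pyGet? (l0::l1::l2::rest) 1 = some l1 by simp [pysem],
            show PySem.List.pyGet? (l0::l1::l2::rest) 2 = some l2 by simp [pysem]]
        simp only [Option.bind_some, Option.map_some, Option.getD_some]
        exact Prod.ext ((winner_core l0 l1 l2).symm) rfl
    · simp [hp]
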